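-- pv_equiv track=rewrite | github.com/thomast8/auto-scientist | src/auto_scientist/sdk_utils.py | validate_report_structure
-- ===== SOURCE A (Python) =====
-- _EXPECTED_HEADINGS = [
--     "executive summary",
--     "problem statement",
--     "methodology",
--     "journey",
--     "best approach",
--     "results",
--     "insights",
--     "limitations",
--     "future work",
--     "version comparison",
-- ]
--
-- def validate_report_structure(text: str) -> list[str]:
--     """Validate that a report has the expected section structure.
--
--     Returns a list of issue strings (empty = valid).
--     Checks for: required headings, non-empty sections, markdown table in
--     Version Comparison section.
--     """
--     issues: list[str] = []
--     lines = text.split("\n")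
--
--     # Find all ## headings and their line indices
--     heading_indices: list[tuple[int, str]] = []
--     for i, line in enumerate(lines):
--         if line.startswith("## "):
--             heading_indices.append((i, line[3:].strip()))
--
--     # Check for expected headings (case-insensitive substring match)
--     found_headings = [h.lower() for _, h in heading_indices]
--     for expected in _EXPECTED_HEADINGS:
--         if not any(expected in h for h in found_headings):
--             issues.append(f"Missing section: {expected}")
--
--     # Check each section has non-empty content
--     for idx, (line_num, heading) in enumerate(heading_indices):
--         if idx + 1 < len(heading_indices):
--             next_line_num = heading_indices[idx + 1][0]
--         else:
--             next_line_num = len(lines)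
--         section_content = "\n".join(lines[line_num + 1 : next_line_num]).strip()
--         if not section_content:
--             issues.append(f"Empty section: {heading}")
--
--     # Check Version Comparison Table has a markdown table
--     for line_num, heading in heading_indices:
--         if "version comparison" in heading.lower():
--             # Find content until next heading or end
--             end = len(lines)
--             for future_num, _ in heading_indices:
--                 if future_num > line_num:
--                     end = future_num
--                     break
--             section = "\n".join(lines[line_num + 1 : end])
--             if "|" not in section:
--                 issues.append("Version Comparison Table section missing markdown table")
--             break
--
--     return issues
-- ===== SOURCE B (Python) =====
-- _EXPECTED_HEADINGS = [
--     "executive summary",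
--     "problem statement",
--     "methodology",
--     "journey",
--     "best approach",
--     "results",
--     "insights",
--     "limitations",
--     "future work",
--     "version comparison",
-- ]
--
--
-- def validate_report_structure(text: str) -> list[str]:
--     """Single pass: segment the lines into (heading, content-lines) records,
--     then run the three checks over the records."""
--     sections: list[tuple[str, list[str]]] = []
--     for line in text.split("\n"):
--         if line.startswith("## "):
--             sections.append((line[3:].strip(), []))
--         elif sections:
--             sections[-1][1].append(line)
--
--     issues: list[str] = []
--     for expected in _EXPECTED_HEADINGS:
--         if not any(expected in h.lower() for h, _ in sections):
--             issues.append(f"Missing section: {expected}")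
--     for h, content in sections:
--         if not "\n".join(content).strip():
--             issues.append(f"Empty section: {h}")
--     for h, content in sections:
--         if "version comparison" in h.lower():
--             if "|" not in "\n".join(content):
--                 issues.append("Version Comparison Table section missing markdown table")
--             break
--     return issues
-- ===== Notes on version B (the rewrite author's own statement) =====
-- stated objective: alternative
-- what changed: A locates markdown headings by line index (enumerate), then re-derives each section's bounds with index lookups and list slices in three separate passes; B segments the lines once into (heading, content-lines) records and runs the three checks directly over those records, with no index arithmetic, slicing or heading-index lookups.
import Mathlib
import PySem

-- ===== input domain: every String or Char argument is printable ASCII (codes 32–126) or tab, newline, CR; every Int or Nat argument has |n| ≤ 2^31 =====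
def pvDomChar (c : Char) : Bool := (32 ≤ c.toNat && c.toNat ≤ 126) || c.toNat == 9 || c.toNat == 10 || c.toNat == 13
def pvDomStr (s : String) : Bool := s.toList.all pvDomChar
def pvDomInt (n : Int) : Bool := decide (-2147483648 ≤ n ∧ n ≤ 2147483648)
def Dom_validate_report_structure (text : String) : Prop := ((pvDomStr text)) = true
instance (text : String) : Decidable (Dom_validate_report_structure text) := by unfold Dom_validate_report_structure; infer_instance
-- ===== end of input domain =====

-- B replaces A's line-index bookkeeping (enumerate + slices + index lookups) by a single-pass
-- segmentation of the lines into (heading, content-lines) records; same return value.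

-- ===== PORT A =====
def vrsExpected : List String :=
  ["executive summary", "problem statement", "methodology", "journey", "best approach",
   "results", "insights", "limitations", "future work", "version comparison"]

-- for i, line in enumerate(lines): if line.startswith("## "): heading_indices.append((i, line[3:].strip()))
def vrsHeadings (lines : List String) : List (Int × String) :=
  (PySem.List.enumerate lines).foldl
    (fun acc p =>
      if PySem.Str.startswith p.2 "## " then
        acc ++ [(p.1, PySem.Str.strip (PySem.Str.slice p.2 (some 3) none))]
      else acc) []

-- found_headings = [h.lower() for _, h in heading_indices]; the Missing-section loop
def vrsMissing (found : List String) : List String :=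
  vrsExpected.foldl
    (fun iss e => if found.any (fun h => PySem.Str.isIn e h) then iss
                  else iss ++ ["Missing section: " ++ e]) []

-- the Empty-section loop: idx is the enumerate counter, suf the remaining heading_indices
def vrsEmptyLoop (lines : List String) (hi : List (Int × String)) :
    List (Int × String) → Int → List String → List String
  | [], _, iss => iss
  | (ln, h) :: rest, idx, iss =>
      vrsEmptyLoop lines hi rest (idx + 1)
        (if PySem.Str.strip (PySem.Str.join "\n"
              (PySem.List.slice lines (some (ln + 1))
                (some (if idx + 1 < (hi.length : Int)
                       then (PySem.List.pyGetD hi (idx + 1) (0, "")).1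
                       else (lines.length : Int))))) = ""
         then iss ++ ["Empty section: " ++ h] else iss)

-- inner loop: 'for future_num, _ in heading_indices: if future_num > line_num: end = future_num; break'
def vrsFindEnd (ln : Int) : List (Int × String) → Int → Int
  | [], e => e
  | (f, _) :: rest, e => if ln < f then f else vrsFindEnd ln rest e

-- the Version Comparison loop (with its break)
def vrsTableLoop (lines : List String) (hi : List (Int × String)) :
    List (Int × String) → List String
  | [] => []
  | (ln, h) :: rest =>
      if PySem.Str.isIn "version comparison" (PySem.Str.lower h) then
        if PySem.Str.isIn "|" (PySem.Str.join "\n"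
            (PySem.List.slice lines (some (ln + 1))
              (some (vrsFindEnd ln hi ((lines.length : Int)))))) then []
        else ["Version Comparison Table section missing markdown table"]
      else vrsTableLoop lines hi rest

def vrsRest (lines : List String) (hi : List (Int × String)) : List String :=
  vrsEmptyLoop lines hi hi 0 (vrsMissing (hi.map (fun p => PySem.Str.lower p.2)))
    ++ vrsTableLoop lines hi hi

def validate_report_structure (text : String) : List String :=
  vrsRest ((PySem.Str.split? text "\n").getD []) (vrsHeadings ((PySem.Str.split? text "\n").getD []))

-- ===== PORT B =====
-- segmentation loop; records are kept reversed (and each content list reversed) while building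
def vrsAltSecs : List String → List (String × List String) → List (String × List String)
  | [], acc => acc
  | l :: ls, acc =>
      if PySem.Str.startswith l "## " then
        vrsAltSecs ls ((PySem.Str.strip (PySem.Str.slice l (some 3) none), []) :: acc)
      else
        match acc with
        | [] => vrsAltSecs ls []
        | (h, c) :: t => vrsAltSecs ls ((h, l :: c) :: t)

def vrsAltSections (lines : List String) : List (String × List String) :=
  ((vrsAltSecs lines []).map (fun p => (p.1, p.2.reverse))).reverse

def vrsAltTable : List (String × List String) → List String
  | [] => []
  | (h, c) :: rest =>
      if PySem.Str.isIn "version comparison" (PySem.Str.lower h) then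
        if PySem.Str.isIn "|" (PySem.Str.join "\n" c) then []
        else ["Version Comparison Table section missing markdown table"]
      else vrsAltTable rest

def vrsAltRest (secs : List (String × List String)) : List String :=
  (secs.foldl
    (fun iss p => if PySem.Str.strip (PySem.Str.join "\n" p.2) = "" then
        iss ++ ["Empty section: " ++ p.1]
      else iss)
    (vrsExpected.foldl
      (fun iss e => if secs.any (fun p => PySem.Str.isIn e (PySem.Str.lower p.1)) then iss
                    else iss ++ ["Missing section: " ++ e]) []))
  ++ vrsAltTable secs

def validate_report_structure_alt (text : String) : List String :=
  vrsAltRest (vrsAltSections ((PySem.Str.split? text "\n").getD []))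

-- ===== PRECONDITION & SPEC =====
def Spec_validate_report_structure (text : String) (out : List String) : Prop := out = validate_report_structure_alt text
instance (text : String) (out : List String) : Decidable (Spec_validate_report_structure text out) := by unfold Spec_validate_report_structure; infer_instance

-- ===== CLAIM =====
def Claim_equal_validate_report_structure : Prop := ∀ (text : String), Dom_validate_report_structure text → Spec_validate_report_structure text (validate_report_structure text)

-- ===== LEMMAS AND PROOFS =====
def notHead (l : String) : Bool := !PySem.Str.startswith l "## "

-- the common shape: the list of (heading, content-lines) sections
def seg : List String → List (String × List String)
  | [] => []
  | l :: ls =>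
      if PySem.Str.startswith l "## " then
        (PySem.Str.strip (PySem.Str.slice l (some 3) none), ls.takeWhile notHead)
          :: seg (ls.dropWhile notHead)
      else seg ls
termination_by ls => ls.length
decreasing_by
  · have := List.length_dropWhile_le notHead ls; simp; omega
  · simp

theorem altSecs_cons (ls : List String) :
    ∀ h c t, ((vrsAltSecs ls ((h, c) :: t)).map (fun p => (p.1, p.2.reverse))).reverse =
      ((t.map (fun p => (p.1, p.2.reverse))).reverse)
        ++ (h, c.reverse ++ ls.takeWhile notHead) :: seg (ls.dropWhile notHead) := by
  induction ls with
  | nil => intro h c t; simp [vrsAltSecs, seg]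
  | cons l ls ih =>
    intro h c t
    by_cases hl : PySem.Chars.startswith l.toList ['#', '#', ' '] = true
    · rw [show vrsAltSecs (l :: ls) ((h, c) :: t)
          = vrsAltSecs ls ((PySem.Str.strip (PySem.Str.slice l (some 3) none), []) :: (h, c) :: t)
        by simp [vrsAltSecs, hl]]
      rw [ih]
      simp [seg, List.takeWhile, List.dropWhile, notHead, hl]
    · rw [show vrsAltSecs (l :: ls) ((h, c) :: t) = vrsAltSecs ls ((h, l :: c) :: t)
        by simp [vrsAltSecs, hl]]
      rw [ih]
      simp [List.takeWhile, List.dropWhile, notHead, hl]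

theorem altSecs_nil (ls : List String) :
    vrsAltSections ls = seg ls := by
  unfold vrsAltSections
  induction ls with
  | nil => simp [vrsAltSecs, seg]
  | cons l ls ih =>
    by_cases hl : PySem.Chars.startswith l.toList ['#', '#', ' '] = true
    · rw [show vrsAltSecs (l :: ls) []
          = vrsAltSecs ls [(PySem.Str.strip (PySem.Str.slice l (some 3) none), [])]
        by simp [vrsAltSecs, hl]]
      rw [altSecs_cons ls _ [] []]
      simp [seg, hl]
    · rw [show vrsAltSecs (l :: ls) [] = vrsAltSecs ls [] by simp [vrsAltSecs, hl]]
      rw [ih]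
      simp [seg, hl]

-- heading indices, recursively
def hIdx : List String → Int → List (Int × String)
  | [], _ => []
  | l :: ls, k =>
      if PySem.Str.startswith l "## " then
        (k, PySem.Str.strip (PySem.Str.slice l (some 3) none)) :: hIdx ls (k + 1)
      else hIdx ls (k + 1)

theorem vrsHeadings_eq_aux (ls : List String) : ∀ (s : Int),
    ((PySem.List.enumerate ls s).filter (fun p => PySem.Str.startswith p.2 "## ")).map
      (fun p => (p.1, PySem.Str.strip (PySem.Str.slice p.2 (some 3) none))) = hIdx ls s := by
  induction ls with
  | nil => intro s; simp [PySem.List.enumerate_nil, hIdx]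
  | cons l ls ih =>
    intro s
    rw [PySem.List.enumerate_cons]
    have ih' := ih (s + 1)
    simp at ih'
    by_cases hl : PySem.Chars.startswith l.toList ['#', '#', ' '] = true <;>
      simp [hIdx, hl, ih']

theorem vrsHeadings_eq (lines : List String) : vrsHeadings lines = hIdx lines 0 := by
  unfold vrsHeadings
  rw [PySem.List.foldl_append_if]
  simpa using vrsHeadings_eq_aux lines 0

theorem hIdx_ge (ls : List String) : ∀ k, ∀ p ∈ hIdx ls k, k ≤ p.1 := by
  induction ls with
  | nil => intro k p hp; simp [hIdx] at hp
  | cons l ls ih =>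
    intro k p hp
    by_cases hl : PySem.Chars.startswith l.toList ['#', '#', ' '] = true <;> simp [hIdx, hl] at hp
    · rcases hp with rfl | hp
      · simp
      · have := ih (k + 1) p hp; omega
    · have := ih (k + 1) p hp; omega

theorem hIdx_pairwise (ls : List String) : ∀ k,
    (hIdx ls k).Pairwise (fun a b => a.1 < b.1) := by
  induction ls with
  | nil => intro k; simp [hIdx]
  | cons l ls ih =>
    intro k
    by_cases hl : PySem.Chars.startswith l.toList ['#', '#', ' '] = true <;> simp [hIdx, hl]
    · refine ⟨fun a b hab => ?_, ih (k + 1)⟩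
      have := hIdx_ge ls (k + 1) (a, b) hab; simp at this; omega
    · exact ih (k + 1)

-- the line index of the following section (or len(lines))
def nextIdx (lines : List String) : List (Int × String) → Int
  | [] => (lines.length : Int)
  | (j, _) :: _ => j

-- correspondence between a suffix of heading_indices and a suffix of the sections
def Corr (lines : List String) : List (Int × String) → List (String × List String) → Prop
  | [], [] => True
  | (ln, h) :: r1, (h', c) :: r2 =>
      h = h' ∧ PySem.List.slice lines (some (ln + 1)) (some (nextIdx lines r1)) = c ∧
        Corr lines r1 r2
  | _, _ => False

theorem hIdx_skip (pre : List String) (hpre : ∀ x ∈ pre, notHead x = true) :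
    ∀ (rest : List String) (m : Int), hIdx (pre ++ rest) m = hIdx rest (m + pre.length) := by
  induction pre with
  | nil => intro rest m; simp
  | cons p pre ih =>
    intro rest m
    have hp : PySem.Chars.startswith p.toList ['#', '#', ' '] = false := by
      have := hpre p (by simp); simpa [notHead] using this
    have := ih (fun x hx => hpre x (by simp [hx])) rest (m + 1)
    simp [hIdx, hp, this]
    ring_nf

theorem dropWhile_head_false {p : String → Bool} :
    ∀ {l : List String} {x : String} {xs : List String},
      l.dropWhile p = x :: xs → p x = false := by
  intro l
  induction l with
  | nil => intro x xs h; simp [List.dropWhile] at h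
  | cons a l ih =>
    intro x xs h
    by_cases ha : p a = true
    · rw [List.dropWhile_cons_of_pos ha] at h; exact ih h
    · rw [List.dropWhile_cons_of_neg ha] at h
      cases h; simpa using ha

theorem master : ∀ (lines ls : List String) (k : Nat),
    lines.drop k = ls → Corr lines (hIdx ls (k : Int)) (seg ls)
  | lines, [], k, h => by simp [hIdx, seg, Corr]
  | lines, l :: ls', k, h => by
    have hdrop1 : lines.drop (k + 1) = ls' := by
      have := congrArg List.tail h
      rw [List.tail_drop] at this
      simpa using this
    by_cases hl : PySem.Chars.startswith l.toList ['#', '#', ' '] = true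
    · have htd : ls'.takeWhile notHead ++ ls'.dropWhile notHead = ls' :=
        List.takeWhile_append_dropWhile
      have htw : ∀ x ∈ ls'.takeWhile notHead, notHead x = true :=
        fun x hx => List.mem_takeWhile_imp hx
      have hdd : ls'.drop (ls'.takeWhile notHead).length = ls'.dropWhile notHead := by
        have h2 := List.drop_left (l₁ := ls'.takeWhile notHead) (l₂ := ls'.dropWhile notHead)
        rw [htd] at h2; exact h2
      have htt : ls'.take (ls'.takeWhile notHead).length = ls'.takeWhile notHead := by
        have h2 := List.take_left (l₁ := ls'.takeWhile notHead) (l₂ := ls'.dropWhile notHead)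
        rw [htd] at h2; exact h2
      have hlen : lines.length = k + 1 + ls'.length := by
        have := congrArg List.length h
        simp [List.length_drop] at this
        omega
      have hskip : hIdx ls' ((k : Int) + 1) =
          hIdx (ls'.dropWhile notHead) ((k : Int) + 1 + (ls'.takeWhile notHead).length) := by
        conv_lhs => rw [← htd]
        rw [hIdx_skip _ htw]
      have hsl : seg (l :: ls') =
          (PySem.Str.strip (PySem.Str.slice l (some 3) none), ls'.takeWhile notHead)
            :: seg (ls'.dropWhile notHead) := by
        rw [seg]; simp [hl]
      have hhi : hIdx (l :: ls') (k : Int) =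
          ((k : Int), PySem.Str.strip (PySem.Str.slice l (some 3) none))
            :: hIdx ls' ((k : Int) + 1) := by
        simp [hIdx, hl]
      have hdroptw : lines.drop (k + 1 + (ls'.takeWhile notHead).length) =
          ls'.dropWhile notHead := by
        rw [← List.drop_drop, hdrop1, hdd]
      rw [hsl, hhi, hskip]
      have hcast : ((k : Int) + 1 + ((ls'.takeWhile notHead).length : Int)) =
          ((k + 1 + (ls'.takeWhile notHead).length : Nat) : Int) := by push_cast; ring
      refine ⟨rfl, ?_, ?_⟩
      · -- the slice between this heading and the next equals the takeWhile block
        cases hdw : ls'.dropWhile notHead with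
        | nil =>
          have htw' : ls'.takeWhile notHead = ls' := by
            have h3 := htd; rw [hdw, List.append_nil] at h3; exact h3
          simp only [hIdx, nextIdx]
          rw [show ((k : Int) + 1) = ((k + 1 : Nat) : Int) by push_cast; ring,
            PySem.List.slice_natCast, hdrop1, htw']
          rw [show lines.length - (k + 1) = ls'.length by omega, List.take_length]
        | cons d dw' =>
          have hdh : PySem.Str.startswith d "## " = true := by
            have := dropWhile_head_false hdw
            simp [notHead] at this
            simpa using this
          rw [hIdx, if_pos hdh]
          simp only [nextIdx]
          rw [hcast, show ((k : Int) + 1) = ((k + 1 : Nat) : Int) by push_cast; ring,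
            PySem.List.slice_natCast, hdrop1]
          rw [show k + 1 + (ls'.takeWhile notHead).length - (k + 1)
              = (ls'.takeWhile notHead).length by omega]
          exact htt
      · rw [hcast]
        exact master lines (ls'.dropWhile notHead) (k + 1 + (ls'.takeWhile notHead).length)
          hdroptw
    · have hhi : hIdx (l :: ls') (k : Int) = hIdx ls' ((k : Int) + 1) := by
        simp [hIdx, hl]
      have hsl : seg (l :: ls') = seg ls' := by rw [seg]; simp [hl]
      rw [hhi, hsl, show ((k : Int) + 1) = ((k + 1 : Nat) : Int) by push_cast; ring]
      exact master lines ls' (k + 1) hdrop1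
termination_by lines ls k _ => ls.length
decreasing_by
  · have := List.length_dropWhile_le notHead ls'; simp; omega
  · simp

theorem corr_map {lines : List String} : ∀ {h1 : List (Int × String)}
    {h2 : List (String × List String)}, Corr lines h1 h2 →
    h1.map (fun p => p.2) = h2.map (fun p => p.1) := by
  intro h1
  induction h1 with
  | nil => intro h2 hc; cases h2 with
    | nil => rfl
    | cons a t => simp [Corr] at hc
  | cons a r1 ih =>
    intro h2 hc
    cases h2 with
    | nil => obtain ⟨ln, hh⟩ := a; simp [Corr] at hc
    | cons b r2 =>
      obtain ⟨ln, h⟩ := a; obtain ⟨h', c⟩ := b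
      obtain ⟨rfl, -, hc⟩ := hc
      simp [ih hc]

-- the per-record Empty-section issues, reading the section bounds off the list itself
def emptyIssues (lines : List String) : List (Int × String) → List String
  | [] => []
  | (ln, h) :: rest =>
      (if PySem.Str.strip (PySem.Str.join "\n"
            (PySem.List.slice lines (some (ln + 1)) (some (nextIdx lines rest)))) = ""
       then ["Empty section: " ++ h] else []) ++ emptyIssues lines rest

theorem emptyLoop_eq (lines : List String) (hi : List (Int × String)) :
    ∀ (suf : List (Int × String)) (idx : Nat) (iss : List String),
      hi.drop idx = suf →
      vrsEmptyLoop lines hi suf (idx : Int) iss = iss ++ emptyIssues lines suf := by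
  intro suf
  induction suf with
  | nil => intro idx iss h; simp [vrsEmptyLoop, emptyIssues]
  | cons p rest ih =>
    intro idx iss h
    obtain ⟨ln, hd⟩ := p
    have hlen : hi.length = idx + rest.length + 1 := by
      have := congrArg List.length h
      simp [List.length_drop] at this
      omega
    have hdrop1 : hi.drop (idx + 1) = rest := by
      have := congrArg List.tail h
      rw [List.tail_drop] at this
      simpa using this
    have hnext : (if (idx : Int) + 1 < (hi.length : Int)
          then (PySem.List.pyGetD hi ((idx : Int) + 1) (0, "")).1
          else (lines.length : Int)) = nextIdx lines rest := by
      cases rest with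
      | nil =>
        have hl2 : hi.length = idx + 1 := by simpa using hlen
        rw [if_neg (by rw [hl2]; push_cast; omega)]
        simp [nextIdx]
      | cons q rest' =>
        have hl2 : hi.length = idx + rest'.length + 2 := by simpa using hlen
        have hlt : (idx : Int) + 1 < (hi.length : Int) := by
          rw [hl2]; push_cast; omega
        rw [if_pos hlt, show ((idx : Int) + 1) = ((idx + 1 : Nat) : Int) by push_cast; ring,
          PySem.List.pyGetD_natCast]
        have hget : hi[idx + 1]? = some q := by
          have h2 := @List.getElem?_drop _ hi (idx + 1) 0
          rw [hdrop1] at h2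
          simpa using h2.symm
        rw [List.getD_eq_getElem?_getD, hget]
        rfl
    rw [vrsEmptyLoop, hnext,
      show ((idx : Int) + 1) = ((idx + 1 : Nat) : Int) by push_cast; ring,
      ih (idx + 1) _ hdrop1, emptyIssues]
    by_cases hc : PySem.Str.strip (PySem.Str.join "\n" (PySem.List.slice lines (some (ln + 1))
        (some (nextIdx lines rest)))) = "" <;> simp [hc]

theorem emptyIssues_corr {lines : List String} : ∀ {h1 : List (Int × String)}
    {h2 : List (String × List String)}, Corr lines h1 h2 →
    emptyIssues lines h1 =
      (h2.filter (fun p => decide (PySem.Str.strip (PySem.Str.join "\n" p.2) = ""))).map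
        (fun p => "Empty section: " ++ p.1) := by
  intro h1
  induction h1 with
  | nil => intro h2 hc; cases h2 with
    | nil => simp [emptyIssues]
    | cons a t => simp [Corr] at hc
  | cons a r1 ih =>
    intro h2 hc
    cases h2 with
    | nil => obtain ⟨ln, h⟩ := a; simp [Corr] at hc
    | cons b r2 =>
      obtain ⟨ln, h⟩ := a; obtain ⟨h', c⟩ := b
      obtain ⟨rfl, hsl, hc⟩ := hc
      rw [emptyIssues, hsl, List.filter_cons]
      by_cases hcond : PySem.Str.strip (PySem.Str.join "\n" c) = "" <;>
        simp [hcond, ih hc]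

theorem findEnd_skip (ln : Int) (e : Int) :
    ∀ (pre rest : List (Int × String)), (∀ p ∈ pre, ¬ ln < p.1) →
      vrsFindEnd ln (pre ++ rest) e = vrsFindEnd ln rest e := by
  intro pre
  induction pre with
  | nil => intro rest h; simp
  | cons q pre ih =>
    intro rest h
    obtain ⟨f, s⟩ := q
    have hf : ¬ ln < f := h (f, s) (by simp)
    simp only [List.cons_append, vrsFindEnd, if_neg hf]
    exact ih rest (fun p hp => h p (by simp [hp]))

theorem table_eq (lines : List String) (hi : List (Int × String))
    (hpw : hi.Pairwise (fun a b => a.1 < b.1)) :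
    ∀ (s1 : List (Int × String)) (s2 : List (String × List String))
      (pre : List (Int × String)), hi = pre ++ s1 → Corr lines s1 s2 →
      vrsTableLoop lines hi s1 = vrsAltTable s2 := by
  intro s1
  induction s1 with
  | nil => intro s2 pre hsplit hc; cases s2 with
    | nil => simp [vrsTableLoop, vrsAltTable]
    | cons a t => simp [Corr] at hc
  | cons a r1 ih =>
    intro s2 pre hsplit hc
    cases s2 with
    | nil => obtain ⟨ln, h⟩ := a; simp [Corr] at hc
    | cons b r2 =>
      obtain ⟨ln, h⟩ := a; obtain ⟨h', c⟩ := b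
      obtain ⟨rfl, hsl, hc⟩ := hc
      rw [vrsTableLoop, vrsAltTable]
      by_cases hm : PySem.Str.isIn "version comparison" (PySem.Str.lower h) = true
      · rw [if_pos hm, if_pos hm]
        have hend : vrsFindEnd ln hi ((lines.length : Int)) = nextIdx lines r1 := by
          rw [hsplit, findEnd_skip]
          · rw [vrsFindEnd, if_neg (by omega)]
            cases r1 with
            | nil => simp [vrsFindEnd, nextIdx]
            | cons q r1' =>
              obtain ⟨j, s⟩ := q
              have hj : ln < j := by
                rw [hsplit] at hpw
                have := (List.pairwise_append.mp hpw).2.1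
                exact (List.pairwise_cons.mp this).1 (j, s) (by simp)
              simp [vrsFindEnd, if_pos hj, nextIdx]
          · intro p hp
            rw [hsplit] at hpw
            have := (List.pairwise_append.mp hpw).2.2 p hp (ln, h) (by simp)
            omega
        rw [hend, hsl]
      · rw [if_neg hm, if_neg hm]
        exact ih r2 (pre ++ [(ln, h)]) (by simp [hsplit]) hc

-- ===== VERDICT =====
theorem validate_report_structure_spec : Claim_equal_validate_report_structure := by
  intro text _
  unfold Spec_validate_report_structure validate_report_structure validate_report_structure_alt
  set lines := (PySem.Str.split? text "\n").getD [] with hlines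
  rw [vrsHeadings_eq lines, altSecs_nil lines]
  have hcorr : Corr lines (hIdx lines 0) (seg lines) := by
    have := master lines lines 0 (by simp)
    simpa using this
  have hmap : (hIdx lines 0).map (fun p => p.2) = (seg lines).map (fun p => p.1) :=
    corr_map hcorr
  unfold vrsRest vrsAltRest
  -- Missing-section issues agree
  have hiss1 : vrsMissing ((hIdx lines 0).map (fun p => PySem.Str.lower p.2))
      = vrsExpected.foldl
        (fun iss e => if (seg lines).any
              (fun p => PySem.Str.isIn e (PySem.Str.lower p.1)) then iss
            else iss ++ ["Missing section: " ++ e]) [] := by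
    unfold vrsMissing
    apply PySem.List.foldl_congr_mem
    intro acc e _
    have h2 : (hIdx lines 0).map (fun p => PySem.Str.lower p.2)
        = ((seg lines).map (fun p => p.1)).map (fun h => PySem.Str.lower h) := by
      rw [← hmap, List.map_map]; rfl
    rw [h2, List.map_map, List.any_map]
    rfl
  rw [hiss1]
  -- Empty-section issues agree
  have he : ∀ iss, vrsEmptyLoop lines (hIdx lines 0) (hIdx lines 0) ((0 : Nat) : Int) iss
      = iss ++ emptyIssues lines (hIdx lines 0) :=
    fun iss => emptyLoop_eq lines (hIdx lines 0) (hIdx lines 0) 0 iss (by simp)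
  simp only [Nat.cast_zero] at he
  rw [he _, emptyIssues_corr hcorr, PySem.List.foldl_append_ite]
  -- Version-Comparison table issues agree
  rw [table_eq lines (hIdx lines 0) (hIdx_pairwise lines 0) (hIdx lines 0) (seg lines) []
    rfl hcorr]
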